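-- pv_equiv track=rewrite | github.com/KHVIII/Tim-s-Google-Foobar-Files | minion-labor-shifts.py | solution
-- ===== SOURCE A (Python) =====
-- def solution(data,n):
--     if n == 0:
--         return []
--     minion_dict = {}
--
--
--     for minion_id in data:
--         if minion_id in minion_dict:
--             minion_dict[minion_id] += 1
--         else:
--             minion_dict[minion_id] = 1
--
--     fixed_data = []
--     for minion_id in data:
--         if not (minion_dict[minion_id] > n):
--             fixed_data.append(minion_id)
--
--     return fixed_data
-- ===== SOURCE B (Python) =====
-- def solution(data, n):
--     # Sort a copy and scan runs of equal ids: a run longer than n marks its id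
--     # as over-worked; then one pass over the original list drops marked ids.
--     over = []
--     s = sorted(data)
--     i = 0
--     while i < len(s):
--         j = i
--         while j < len(s) and s[j] == s[i]:
--             j += 1
--         if j - i > n:
--             over.append(s[i])
--         i = j
--     overset = set(over)
--     return [x for x in data if x not in overset]
-- ===== Notes on version B (the rewrite author's own statement) =====
-- stated objective: alternative
-- what changed: Replaces A's hash-counting pass by a sort-then-run-scan: B sorts a copy, scans maximal runs of equal ids marking runs longer than n, then drops marked ids in one pass over the original list; the n==0 guard disappears because every run has length >= 1 > 0.
import Mathlib
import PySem

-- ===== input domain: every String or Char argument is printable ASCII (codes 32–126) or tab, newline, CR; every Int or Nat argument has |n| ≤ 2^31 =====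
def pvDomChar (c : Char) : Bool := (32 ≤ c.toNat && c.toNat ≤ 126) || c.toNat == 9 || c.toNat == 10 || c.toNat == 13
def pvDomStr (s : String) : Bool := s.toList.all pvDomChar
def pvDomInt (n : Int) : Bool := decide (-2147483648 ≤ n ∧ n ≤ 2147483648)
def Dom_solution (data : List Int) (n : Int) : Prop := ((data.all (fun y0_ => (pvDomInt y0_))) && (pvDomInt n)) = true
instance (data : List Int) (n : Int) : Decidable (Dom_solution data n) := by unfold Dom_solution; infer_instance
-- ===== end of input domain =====

-- B replaces A's frequency dictionary by sort-then-run-scan: a sorted copy is scanned once,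
-- runs longer than n mark their id, and one pass drops marked ids (alternative algorithm, not faster).

-- ===== PORT A =====
-- A: frequency dict, then filter by dict count ≤ n; n == 0 early-returns []
def solution (data : List Int) (n : Int) : List Int :=
  if n = 0 then []
  else
    let minion_dict : PySem.Dict Int Int :=
      data.foldl (fun d x => if d.contains x then d.modify x 0 (· + 1) else d.insert x 1)
        PySem.Dict.empty
    -- minion_dict[minion_id]: key always present after the first loop, so getD is exact
    data.foldl (fun acc x => if ¬ (minion_dict.getD x 0 > n) then acc ++ [x] else acc) []

-- ===== PORT B =====
-- B's outer while loop over the sorted list: each iteration consumes one maximal run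
-- (the inner 'while s[j] == s[i]' is the takeWhile, the jump 'i = j' is the dropWhile)
def runScan (n : Int) : List Int → List Int
  | [] => []
  | x :: rest =>
    if (((rest.takeWhile (fun y => y == x)).length : Int) + 1 > n)
    then x :: runScan n (rest.dropWhile (fun y => y == x))
    else runScan n (rest.dropWhile (fun y => y == x))
  termination_by l => l.length
  decreasing_by
  all_goals
    have := List.length_dropWhile_le (fun y => y == x) rest
    simp only [List.length_cons]
    omega

def solution_alt (data : List Int) (n : Int) : List Int :=
  let s := PySem.List.sorted data (fun x => x) false
  let overworked := PySem.Set.ofList (runScan n s)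
  data.filter (fun x => !(PySem.Set.contains overworked x))

-- ===== PRECONDITION & SPEC =====
def Spec_solution (data : List Int) (n : Int) (out : List Int) : Prop := out = solution_alt data n
instance (data : List Int) (n : Int) (out : List Int) : Decidable (Spec_solution data n out) := by unfold Spec_solution; infer_instance

-- ===== CLAIM (what is proved, stated in full; the proofs are below) =====
def Claim_equal_solution : Prop := ∀ (data : List Int) (n : Int), Dom_solution data n → Spec_solution data n (solution data n)

-- ===== LEMMAS AND PROOFS =====

-- A's counting loop (contains-branch form) computes occurrence counts
theorem loopA_getD (l : List Int) (d : PySem.Dict Int Int) (v : Int) :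
    (l.foldl (fun d x => if d.contains x then d.modify x 0 (· + 1) else d.insert x 1) d).getD v 0
      = d.getD v 0 + l.count v := by
  induction l generalizing d with
  | nil => simp
  | cons x xs ih =>
    simp only [List.foldl_cons, ih, List.count_cons]
    by_cases hc : d.contains x = true
    · simp only [hc, if_true, PySem.Dict.getD_modify]
      by_cases hv : v = x <;> simp [hv] <;> omega
    · simp only [hc, Bool.false_eq_true, if_false, PySem.Dict.getD_insert]
      by_cases hv : v = x
      · subst hv
        rw [PySem.Dict.getD_of_not_contains d 0 (by simpa using hc)]
        simp only [beq_self_eq_true, if_true]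
        omega
      · rw [if_neg hv]
        have hb : (x == v) = false := by
          simp only [beq_eq_false_iff_ne, ne_eq]
          exact fun h => hv h.symm
        simp [hb]

-- membership in runScan is membership in the scanned list
theorem runScan_subset (n : Int) (s : List Int) (v : Int) (h : v ∈ runScan n s) : v ∈ s := by
  match s with
  | [] => simp [runScan] at h
  | x :: rest =>
    have ih : v ∈ runScan n (rest.dropWhile (fun y => y == x)) →
        v ∈ rest.dropWhile (fun y => y == x) :=
      runScan_subset n (rest.dropWhile (fun y => y == x)) v
    rw [runScan] at h
    by_cases hbig : ((rest.takeWhile (fun y => y == x)).length : Int) + 1 > n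
    · rw [if_pos hbig] at h
      rcases List.mem_cons.mp h with hvx | h'
      · exact hvx ▸ List.mem_cons_self
      · exact List.mem_cons.mpr (Or.inr (List.Sublist.mem (ih h') (List.dropWhile_sublist _)))
    · rw [if_neg hbig] at h
      exact List.mem_cons.mpr (Or.inr (List.Sublist.mem (ih h) (List.dropWhile_sublist _)))
  termination_by s.length
  decreasing_by
    have := List.length_dropWhile_le (fun y => y == x) rest
    simp only [List.length_cons]
    omega

-- on a weakly increasing list, runScan collects exactly the ids whose count exceeds n
theorem mem_runScan (n : Int) (s : List Int) (hs : s.Pairwise (· ≤ ·)) (v : Int)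
    (hv : v ∈ s) : v ∈ runScan n s ↔ (s.count v : Int) > n := by
  match s with
  | [] => simp at hv
  | x :: rest =>
    have hle : ∀ y ∈ rest, x ≤ y := (List.pairwise_cons.mp hs).1
    have hrest_pw : rest.Pairwise (· ≤ ·) := (List.pairwise_cons.mp hs).2
    have hpw' : (rest.dropWhile (fun y => y == x)).Pairwise (· ≤ ·) :=
      hrest_pw.sublist (List.dropWhile_sublist _)
    have ih : v ∈ rest.dropWhile (fun y => y == x) →
        (v ∈ runScan n (rest.dropWhile (fun y => y == x)) ↔
          ((rest.dropWhile (fun y => y == x)).count v : Int) > n) :=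
      mem_runScan n (rest.dropWhile (fun y => y == x)) hpw' v
    -- every element of the tail after the run differs from x
    have hne : ∀ y ∈ rest.dropWhile (fun y => y == x), y ≠ x := by
      intro y hy
      rcases hd : rest.dropWhile (fun y => y == x) with _ | ⟨z, t⟩
      · simp [hd] at hy
      · have hz : (z == x) = false := by
          have := List.head?_dropWhile_not (fun y => y == x) rest
          rw [hd] at this; simpa using this
        have hzx : z ≠ x := by simpa using hz
        have hzle : x ≤ z := hle z (List.Sublist.mem (by rw [hd]; exact List.mem_cons_self) (List.dropWhile_sublist _))
        have hzlt : x < z := lt_of_le_of_ne hzle (Ne.symm hzx)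
        rw [hd] at hy hpw'
        rcases List.mem_cons.mp hy with rfl | hy
        · exact hzx
        · have : z ≤ y := (List.pairwise_cons.mp hpw').1 y hy
          omega
    have hdecomp : rest = rest.takeWhile (fun y => y == x) ++ rest.dropWhile (fun y => y == x) :=
      (List.takeWhile_append_dropWhile).symm
    have hrunx : ∀ y ∈ rest.takeWhile (fun y => y == x), y = x := by
      intro y hy
      have := List.mem_takeWhile_imp hy
      simpa using this
    -- the count of v in x :: rest, split by whether v is the run's id
    have hcount : ((x :: rest).count v : Int)
        = (if v = x then ((rest.takeWhile (fun y => y == x)).length : Int) + 1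
           else ((rest.dropWhile (fun y => y == x)).count v : Int)) := by
      by_cases hv : v = x
      · subst hv
        rw [List.count_cons_self]
        conv_lhs => rw [hdecomp]
        rw [List.count_append]
        have h1 : (rest.takeWhile (fun y => y == v)).count v
            = (rest.takeWhile (fun y => y == v)).length :=
          List.count_eq_length.mpr (fun y hy => ((hrunx y hy) ▸ rfl))
        have h2 : (rest.dropWhile (fun y => y == v)).count v = 0 :=
          List.count_eq_zero.mpr (fun hmem => (hne v hmem) rfl)
        simp [h1, h2]
      · have hb : (x == v) = false := by
          simp only [beq_eq_false_iff_ne, ne_eq]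
          exact fun h => hv h.symm
        have hxx : (x :: rest).count v = rest.count v := by
          simp [List.count_cons, hb]
        rw [hxx]
        conv_lhs => rw [hdecomp]
        rw [List.count_append]
        have h1 : (rest.takeWhile (fun y => y == x)).count v = 0 :=
          List.count_eq_zero.mpr (fun hmem => hv (hrunx v hmem))
        simp [h1, hv]
    have hnotx : v ∈ runScan n (rest.dropWhile (fun y => y == x)) → v ≠ x :=
      fun hm hvx => (hne v (runScan_subset n _ v hm)) hvx
    -- if v occurs in s and is not the run's id, it occurs after the run
    have hvtail : v ≠ x → v ∈ rest.dropWhile (fun y => y == x) := by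
      intro hvx
      rcases List.mem_cons.mp hv with rfl | hvr
      · exact absurd rfl hvx
      · rw [hdecomp] at hvr
        rcases List.mem_append.mp hvr with hvr | hvr
        · exact absurd (hrunx v hvr) hvx
        · exact hvr
    rw [runScan, hcount]
    by_cases hbig : ((rest.takeWhile (fun y => y == x)).length : Int) + 1 > n
    · rw [if_pos hbig]
      constructor
      · intro hmem
        rcases List.mem_cons.mp hmem with hvx | hmem'
        · rw [if_pos hvx]; exact hbig
        · rw [if_neg (hnotx hmem')]
          exact (ih (runScan_subset n _ v hmem')).mp hmem'
      · intro hcnt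
        by_cases hv : v = x
        · exact List.mem_cons.mpr (Or.inl hv)
        · rw [if_neg hv] at hcnt
          exact List.mem_cons.mpr (Or.inr ((ih (hvtail hv)).mpr hcnt))
    · rw [if_neg hbig]
      constructor
      · intro hmem
        rw [if_neg (hnotx hmem)]
        exact (ih (runScan_subset n _ v hmem)).mp hmem
      · intro hcnt
        by_cases hv : v = x
        · rw [if_pos hv] at hcnt; exact absurd hcnt hbig
        · rw [if_neg hv] at hcnt
          exact (ih (hvtail hv)).mpr hcnt
  termination_by s.length
  decreasing_by
    have := List.length_dropWhile_le (fun y => y == x) rest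
    simp only [List.length_cons]
    omega

-- B's filter keeps exactly the elements with count ≤ n
theorem solution_alt_eq_filter (data : List Int) (n : Int) :
    solution_alt data n = data.filter (fun x => decide ((data.count x : Int) ≤ n)) := by
  unfold solution_alt
  apply List.filter_congr
  intro x hxd
  have hpw : (PySem.List.sorted data (fun x => x) false).Pairwise (· ≤ ·) :=
    PySem.List.sorted_pairwise data (fun x => x)
  have hperm : (PySem.List.sorted data (fun x => x) false).Perm data :=
    PySem.List.sorted_perm data (fun x => x) false
  have hcnt : (PySem.List.sorted data (fun x => x) false).count x = data.count x :=
    hperm.count_eq x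
  have hxs : x ∈ PySem.List.sorted data (fun x => x) false :=
    (PySem.List.mem_sorted data (fun x => x) false x).mpr hxd
  have hmem := mem_runScan n (PySem.List.sorted data (fun x => x) false) hpw x hxs
  rw [hcnt] at hmem
  by_cases hc : (data.count x : Int) ≤ n
  · have hnot : x ∉ runScan n (PySem.List.sorted data (fun x => x) false) := by
      rw [hmem]; omega
    simp [PySem.Set.mem_ofList, hnot, hc]
  · have hin : x ∈ runScan n (PySem.List.sorted data (fun x => x) false) := by
      rw [hmem]; omega
    simp [PySem.Set.mem_ofList, hin, hc]

-- ===== VERDICT (by name: the statement is the Claim_ definition above) =====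
theorem solution_spec : Claim_equal_solution := by
  intro data n _
  unfold Spec_solution solution
  rw [solution_alt_eq_filter]
  split_ifs with h0
  · subst h0
    symm
    simp only [List.filter_eq_nil_iff, decide_eq_true_eq]
    intro x hx
    have h := List.count_pos_iff.mpr hx
    omega
  · rw [PySem.List.foldl_append_ite_eq_filter]
    simp only [List.nil_append]
    apply List.filter_congr
    intro x _
    have := loopA_getD data PySem.Dict.empty x
    simp only [PySem.Dict.getD_empty, zero_add] at this
    simp only [this, not_lt]
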